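-- pv_equiv track=rewrite | github.com/wephy/pinn-optimisation | fbpinns/trainers3.py | get_jmaps
-- ===== SOURCE A (Python) =====
-- def get_jmaps(required_ujs):
--     "Generate tree for computing chained jacobians"
--     tree = {}
--     for iu,ixs in required_ujs:
--         t = tree
--         for ix in ixs:
--             if ix not in t:
--                 t[ix] = {}
--             t = t[ix]
--     def get_nodes(t, n=(), ks=()):
--         ni = len(n)-1 + 1
--         for k in t:
--             ks_ = ks+(k,)
--             if t[k]:
--                 n += (((ni,k),ks_,0),)
--                 n = get_nodes(t[k], n, ks_)
--             else:
--                 n += (((ni,k),ks_,1),)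
--         return n
--     nodes = get_nodes(tree)
--     leaves = tuple((i + 1, node[1]) for i,node in enumerate(nodes) if node[2])
--     if not leaves:
--         leaves = ((0,()),)
--     jac_is = ()
--     for iu,ixs in required_ujs:
--         io = len(ixs)
--         il = [leaf[1][:io] for leaf in leaves].index(ixs)
--         jac_is += ((il, io, iu),)
--     return nodes, leaves, jac_is
-- ===== SOURCE B (Python) =====
-- def get_jmaps(required_ujs):
--     "Generate tree for computing chained jacobians (stack-based DFS instead of recursion)"
--     tree = {}
--     for iu, ixs in required_ujs:
--         t = tree
--         for ix in ixs:
--             t = t.setdefault(ix, {})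
--     nodes = []
--     stack = [(k, tree[k], (), 0) for k in reversed(tree)]
--     while stack:
--         k, c, ks, p = stack.pop()
--         ks_ = ks + (k,)
--         if c:
--             nodes.append(((p, k), ks_, 0))
--             me = len(nodes)  # this node's 1-based index = parent index for its children
--             stack.extend((k2, c[k2], ks_, me) for k2 in reversed(c))
--         else:
--             nodes.append(((p, k), ks_, 1))
--     nodes = tuple(nodes)
--     leaves = tuple((i + 1, nd[1]) for i, nd in enumerate(nodes) if nd[2]) or ((0, ()),)
--     def first_leaf(ixs):
--         io = len(ixs)
--         return next(i for i, leaf in enumerate(leaves) if leaf[1][:io] == ixs)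
--     jac_is = tuple((first_leaf(ixs), len(ixs), iu) for iu, ixs in required_ujs)
--     return nodes, leaves, jac_is
-- ===== Notes on version B (the rewrite author's own statement) =====
-- stated objective: faster
-- what changed: A's recursive get_nodes walk that accumulates nodes by tuple concatenation is replaced by an explicit stack-based pre-order DFS appending to a list, and the map-then-.index jac_is lookup by a direct first-match scan over the leaves.
import Mathlib
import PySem

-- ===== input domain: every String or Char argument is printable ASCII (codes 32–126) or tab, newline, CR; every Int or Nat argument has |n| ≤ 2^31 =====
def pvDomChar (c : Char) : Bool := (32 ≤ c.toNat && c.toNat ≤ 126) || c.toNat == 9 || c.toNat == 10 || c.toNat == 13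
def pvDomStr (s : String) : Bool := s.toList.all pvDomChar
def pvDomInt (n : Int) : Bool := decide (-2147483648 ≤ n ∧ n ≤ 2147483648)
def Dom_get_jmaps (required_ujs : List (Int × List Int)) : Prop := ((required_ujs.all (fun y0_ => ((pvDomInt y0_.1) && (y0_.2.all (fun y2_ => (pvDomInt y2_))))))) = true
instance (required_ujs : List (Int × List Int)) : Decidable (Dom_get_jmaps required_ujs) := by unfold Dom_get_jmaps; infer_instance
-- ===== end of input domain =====

-- B replaces A's recursive tree walk (which rebuilds its node tuple on every append) by an
-- explicit stack-based pre-order DFS appending to a list, and the map-then-.index jac_is lookup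
-- by a direct first-match scan over the leaves (objective: faster, measured).

-- Shared trie infrastructure (Python's nested dict; the build phase is identical in Source A and Source B,
-- so it is a shared helper): son-brother encoding, keys in insertion order.
-- 'nil' is the empty dict {}; 'cons k c sib' is a dict whose first key is k with subtree c.
inductive PyTrie : Type where
  | nil : PyTrie
  | cons : Int → PyTrie → PyTrie → PyTrie
deriving DecidableEq

-- the inner loop 'for ix in ixs: if ix not in t: t[ix] = {}; t = t[ix]' (functional in-place update)
def insertPath : PyTrie → List Int → PyTrie
  | t, [] => t
  | .nil, ix :: rest => .cons ix (insertPath .nil rest) .nil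
  | .cons k c sib, ix :: rest =>
    if k = ix then .cons k (insertPath c rest) sib
    else .cons k c (insertPath sib (ix :: rest))
termination_by t ixs => (ixs.length, sizeOf t)

def buildTrie (required_ujs : List (Int × List Int)) : PyTrie :=
  required_ujs.foldl (fun t p => insertPath t p.2) .nil

-- size used only for dfsLoop termination
def sizeP : PyTrie → Nat
  | .nil => 0
  | .cons _ c sib => 1 + sizeP c + sizeP sib

-- ===== PORT A =====
-- A's recursive get_nodes: ni = len(n) is fixed at call entry (shared by all siblings of that call).
def getNodesK : PyTrie → Int → List ((Int × Int) × List Int × Int) → List Int → List ((Int × Int) × List Int × Int)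
  | .nil, _, n, _ => n
  | .cons k c sib, ni, n, ks =>
    let ks' := ks ++ [k]
    if c ≠ .nil then
      getNodesK sib ni (getNodesK c (((n ++ [((ni, k), ks', 0)]).length : Nat) : Int) (n ++ [((ni, k), ks', 0)]) ks') ks
    else
      getNodesK sib ni (n ++ [((ni, k), ks', 1)]) ks

def get_jmaps (required_ujs : List (Int × List Int)) : (List ((Int × Int) × List Int × Int)) × (List (Int × List Int)) × (List (Int × Int × Int)) :=
  let tree := buildTrie required_ujs
  let nodes := getNodesK tree ((([] : List ((Int × Int) × List Int × Int)).length : Nat) : Int) [] []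
  let leaves0 := ((PySem.List.enumerate nodes 0).filter (fun p => p.2.2.2 != 0)).map
    (fun p => (p.1 + 1, p.2.2.1))
  let leaves := if leaves0 = [] then [((0 : Int), ([] : List Int))] else leaves0
  let jac_is := required_ujs.foldl
    (fun acc p =>
      let io : Int := (p.2.length : Int)
      -- '.index' raises ValueError only when no leaf-path prefix equals p.2, which never
      -- happens for a path that was inserted into the trie; 'getD 0' ports that dead branch.
      let il : Int := (((PySem.List.index? (leaves.map (fun lf => PySem.List.slice lf.2 none (some io))) p.2).getD 0 : Nat) : Int)
      acc ++ [(il, io, p.1)]) []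
  (nodes, leaves, jac_is)

-- ===== PORT B =====
-- stack entries (k, subtree, prefix, parent_1based); a Lean list with head = top of stack
-- realises Source B's 'seed/push reversed, pop from the end'.
def dfsEntries : PyTrie → List Int → Int → List (Int × PyTrie × List Int × Int)
  | .nil, _, _ => []
  | .cons k c sib, ks, p => (k, c, ks, p) :: dfsEntries sib ks p

def stackSize : List (Int × PyTrie × List Int × Int) → Nat
  | [] => 0
  | e :: rest => 1 + sizeP e.2.1 + stackSize rest

-- termination helpers for dfsLoop (cited in its decreasing_by)
theorem stackSize_append (xs ys : List (Int × PyTrie × List Int × Int)) :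
    stackSize (xs ++ ys) = stackSize xs + stackSize ys := by
  induction xs with
  | nil => simp [stackSize]
  | cons e rest ih => simp [stackSize, ih]; omega

theorem stackSize_dfsEntries (t : PyTrie) (ks : List Int) (p : Int) :
    stackSize (dfsEntries t ks p) = sizeP t := by
  induction t generalizing ks p with
  | nil => simp [dfsEntries, stackSize, sizeP]
  | cons k c sib ihc ihs => simp [dfsEntries, stackSize, sizeP, ihs]

def dfsLoop (stack : List (Int × PyTrie × List Int × Int))
    (nodes : List ((Int × Int) × List Int × Int)) : List ((Int × Int) × List Int × Int) :=
  match stack with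
  | [] => nodes
  | (k, c, ks, p) :: rest =>
    let ks' := ks ++ [k]
    if c ≠ .nil then
      let nodes' := nodes ++ [((p, k), ks', 0)]
      dfsLoop (dfsEntries c ks' ((nodes'.length : Nat) : Int) ++ rest) nodes'
    else
      dfsLoop rest (nodes ++ [((p, k), ks', 1)])
termination_by stackSize stack
decreasing_by
  · simp [stackSize, stackSize_append, stackSize_dfsEntries]
  · simp [stackSize]

-- first leaf whose path-prefix of length io equals ixs (Source B's first_leaf / next(enumerate) scan)
def leafScan : List (Int × List Int) → Int → List Int → Nat → Option Nat
  | [], _, _, _ => none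
  | lf :: rest, io, ixs, i =>
    if PySem.List.slice lf.2 none (some io) = ixs then some i else leafScan rest io ixs (i + 1)

def get_jmaps_alt (required_ujs : List (Int × List Int)) : (List ((Int × Int) × List Int × Int)) × (List (Int × List Int)) × (List (Int × Int × Int)) :=
  let tree := buildTrie required_ujs
  let nodes := dfsLoop (dfsEntries tree [] 0) []
  let leaves0 := ((PySem.List.enumerate nodes 0).filter (fun p => p.2.2.2 != 0)).map
    (fun p => (p.1 + 1, p.2.2.1))
  let leaves := if leaves0 = [] then [((0 : Int), ([] : List Int))] else leaves0
  let jac_is := required_ujs.foldl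
    (fun acc p =>
      -- Source B's next(…) raises StopIteration only when no leaf matches, which never happens
      -- for a path that was inserted into the trie; 'getD 0' ports that dead branch.
      acc ++ [((((leafScan leaves (p.2.length : Int) p.2 0).getD 0 : Nat) : Int), ((p.2.length : Int)), p.1)]) []
  (nodes, leaves, jac_is)

-- ===== PRECONDITION & SPEC =====
def Spec_get_jmaps (required_ujs : List (Int × List Int)) (out : (List ((Int × Int) × List Int × Int)) × (List (Int × List Int)) × (List (Int × Int × Int))) : Prop := out = get_jmaps_alt required_ujs
instance (required_ujs : List (Int × List Int)) (out : (List ((Int × Int) × List Int × Int)) × (List (Int × List Int)) × (List (Int × Int × Int))) : Decidable (Spec_get_jmaps required_ujs out) := by unfold Spec_get_jmaps; infer_instance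

-- ===== CLAIM (what is proved, stated in full; the proofs are below) =====
def Claim_equal_get_jmaps : Prop := ∀ (required_ujs : List (Int × List Int)), Dom_get_jmaps required_ujs → Spec_get_jmaps required_ujs (get_jmaps required_ujs)

-- ===== LEMMAS AND PROOFS =====

-- stack DFS = recursive walk
theorem dfsLoop_eq (t : PyTrie) (p : Int) (ks : List Int)
    (rest : List (Int × PyTrie × List Int × Int)) (nodes : List ((Int × Int) × List Int × Int)) :
    dfsLoop (dfsEntries t ks p ++ rest) nodes = dfsLoop rest (getNodesK t p nodes ks) := by
  induction t generalizing p ks rest nodes with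
  | nil => simp [dfsEntries, getNodesK]
  | cons k c sib ihc ihs =>
    by_cases hc : c = PyTrie.nil
    · subst hc
      simp [dfsEntries, getNodesK, dfsLoop, ihs]
    · simp only [dfsEntries, List.cons_append]
      rw [dfsLoop]
      simp only [hc, if_pos, ne_eq, not_false_iff]
      rw [ihc, ihs, getNodesK]
      simp [hc]

-- direct scan = map-then-index? (accumulator-generalised)
theorem leafScan_eq_aux (leaves : List (Int × List Int)) (io : Int) (ixs : List Int) (i : Nat) :
    leafScan leaves io ixs i =
      (PySem.List.index? (leaves.map (fun lf => PySem.List.slice lf.2 none (some io))) ixs).map (· + i) := by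
  induction leaves generalizing i with
  | nil => simp [leafScan, PySem.List.index?_eq_idxOf?]
  | cons lf rest ih =>
    by_cases h : PySem.List.slice lf.2 none (some io) = ixs
    · rw [List.map_cons, h, PySem.List.index?_cons_self]
      simp [leafScan, h]
    · rw [List.map_cons, PySem.List.index?_cons_of_ne _ h]
      simp only [leafScan, h, if_false, ih (i + 1), Option.map_map]
      cases PySem.List.index? (rest.map (fun lf => PySem.List.slice lf.2 none (some io))) ixs with
      | none => rfl
      | some j => simp; omega

theorem leafScan_eq (leaves : List (Int × List Int)) (io : Int) (ixs : List Int) :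
    leafScan leaves io ixs 0 =
      PySem.List.index? (leaves.map (fun lf => PySem.List.slice lf.2 none (some io))) ixs := by
  rw [leafScan_eq_aux]
  cases PySem.List.index? (leaves.map (fun lf => PySem.List.slice lf.2 none (some io))) ixs <;> simp

-- ===== VERDICT (by name: the statement is the Claim_ definition above) =====
theorem get_jmaps_spec : Claim_equal_get_jmaps := by
  intro r _
  have hn : getNodesK (buildTrie r) ((([] : List ((Int × Int) × List Int × Int)).length : Nat) : Int) [] [] =
      dfsLoop (dfsEntries (buildTrie r) [] 0) [] := by
    have h := dfsLoop_eq (buildTrie r) 0 [] [] []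
    simp only [List.append_nil] at h
    rw [h]; simp [dfsLoop]
  simp only [Spec_get_jmaps, get_jmaps, get_jmaps_alt, hn]
  refine congrArg (Prod.mk _) (congrArg (Prod.mk _) ?_)
  have hf : ∀ leaves : List (Int × List Int),
      (fun (acc : List (Int × Int × Int)) (p : Int × List Int) =>
        acc ++ [((((PySem.List.index? (leaves.map (fun lf => PySem.List.slice lf.2 none (some ((p.2.length : Int))))) p.2).getD 0 : Nat) : Int), ((p.2.length : Int)), p.1)]) =
      (fun (acc : List (Int × Int × Int)) (p : Int × List Int) =>
        acc ++ [((((leafScan leaves (p.2.length : Int) p.2 0).getD 0 : Nat) : Int), ((p.2.length : Int)), p.1)]) := by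
    intro leaves
    funext acc p
    rw [leafScan_eq]
  rw [hf]
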